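-- pv_equiv track=rewrite | github.com/Kblz13/CodigosClases | Sumar Numeros pares en lista.py | sumaux
-- ===== SOURCE A (Python) =====
-- def sumaux(lista1,lista2):
--     par=0
--     impar=0
--     resultado=[]
--     indice=0
--     for elemento in lista1:
--         indice+=1
--         if indice%2==0:
--             par+=elemento
--         else:
--             impar+=elemento
--     indice=0
--     for elemento in lista2:
--         indice+=1
--         if indice%2==0:
--             par+=elemento
--         else:
--             impar+=elemento
--     resultado=[par,impar]
--     return resultado
-- ===== SOURCE B (Python) =====
-- def sumaux(lista1, lista2):
--     par = sum(lista1[1::2]) + sum(lista2[1::2])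
--     impar = sum(lista1[0::2]) + sum(lista2[0::2])
--     return [par, impar]
-- ===== Notes on version B (the rewrite author's own statement) =====
-- stated objective: simpler
-- what changed: Replaces the index counter and parity branch inside a single loop with two strided slices per list (sum of 0-based odd indices = even positions, sum of 0-based even indices = odd positions).
import Mathlib
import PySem

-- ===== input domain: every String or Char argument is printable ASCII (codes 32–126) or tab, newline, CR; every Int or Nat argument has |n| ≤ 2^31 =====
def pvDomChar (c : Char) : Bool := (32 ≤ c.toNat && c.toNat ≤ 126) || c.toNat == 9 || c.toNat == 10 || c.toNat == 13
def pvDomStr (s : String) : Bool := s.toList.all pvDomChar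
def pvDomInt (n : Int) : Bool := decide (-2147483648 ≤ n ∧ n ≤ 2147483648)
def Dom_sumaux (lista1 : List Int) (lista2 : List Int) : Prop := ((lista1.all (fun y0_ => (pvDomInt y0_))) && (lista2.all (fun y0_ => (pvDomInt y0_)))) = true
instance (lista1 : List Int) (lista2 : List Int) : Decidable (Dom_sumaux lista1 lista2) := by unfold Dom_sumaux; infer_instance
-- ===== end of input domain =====

-- B replaces A's index counter and parity branch with two strided slices per list; objective: simpler.
-- ===== PORT A =====
-- the for-loop over one list: state (par, impar, indice), one step per element, branches in source order
def sumauxLoop : List Int → Int → Int → Int → Int × Int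
  | [], par, impar, _ => (par, impar)
  | e :: rest, par, impar, indice =>
      let indice' := indice + 1
      if indice' % 2 == 0 then sumauxLoop rest (par + e) impar indice'
      else sumauxLoop rest par (impar + e) indice'

def sumaux (lista1 : List Int) (lista2 : List Int) : List Int :=
  let par : Int := 0
  let impar : Int := 0
  let (par, impar) := sumauxLoop lista1 par impar 0
  let (par, impar) := sumauxLoop lista2 par impar 0
  [par, impar]

-- ===== PORT B =====
-- lista[k::2] (stride-2 slice): head, then every second element; exact for step 2 from a nonnegative start
def stride2 : List Int → List Int
  | [] => []
  | [x] => [x]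
  | x :: _ :: rest => x :: stride2 rest

def sumaux_alt (lista1 : List Int) (lista2 : List Int) : List Int :=
  let par := (stride2 (lista1.drop 1)).sum + (stride2 (lista2.drop 1)).sum
  let impar := (stride2 lista1).sum + (stride2 lista2).sum
  [par, impar]

-- ===== PRECONDITION & SPEC =====
def Spec_sumaux (lista1 : List Int) (lista2 : List Int) (out : List Int) : Prop := out = sumaux_alt lista1 lista2
instance (lista1 : List Int) (lista2 : List Int) (out : List Int) : Decidable (Spec_sumaux lista1 lista2 out) := by unfold Spec_sumaux; infer_instance

-- ===== CLAIM (what is proved, stated in full; the proofs are below) =====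
def Claim_equal_sumaux : Prop := ∀ (lista1 : List Int) (lista2 : List Int), Dom_sumaux lista1 lista2 → Spec_sumaux lista1 lista2 (sumaux lista1 lista2)

-- ===== LEMMAS AND PROOFS =====
theorem stride2_cons (y : Int) (rest : List Int) : stride2 (y :: rest) = y :: stride2 rest.tail := by
  cases rest <;> simp [stride2]

theorem sumauxLoop_eq (l : List Int) : ∀ (par impar idx : Int), idx % 2 = 0 →
    sumauxLoop l par impar idx =
      (par + (stride2 (l.drop 1)).sum, impar + (stride2 l).sum) := by
  induction l using stride2.induct with
  | case1 => intro par impar idx _; simp [sumauxLoop, stride2]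
  | case2 x =>
    intro par impar idx h
    have h1 : (idx + 1) % 2 ≠ 0 := by omega
    simp [sumauxLoop, stride2, h1]
  | case3 x y rest ih =>
    intro par impar idx h
    have h1 : (idx + 1) % 2 ≠ 0 := by omega
    have h2 : (idx + 1 + 1) % 2 = 0 := by omega
    simp only [sumauxLoop, beq_iff_eq, if_neg h1, if_pos h2,
      ih (par + y) (impar + x) (idx + 1 + 1) h2]
    simp [stride2, stride2_cons]
    constructor <;> ring

-- ===== VERDICT (by name: the statement is the Claim_ definition above) =====
theorem sumaux_spec : Claim_equal_sumaux := by
  intro l1 l2 _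
  show sumaux l1 l2 = sumaux_alt l1 l2
  simp only [sumaux, sumaux_alt, sumauxLoop_eq _ _ _ 0 rfl]
  simp
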